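-- pv_equiv track=rewrite | github.com/aman1108/Interview-Coding-Questions | Array/Decode XORed Permutation.py | solve
-- ===== SOURCE A (Python) =====
-- def solve(encoded):
--     n=len(encoded)
--     v=0
--     for i in range(1,n+2):
--         v=v^i
--
--     for i in range(1,n,2):
--         v=v^encoded[i]
--
--     ans=[v]
--     for i in range(n):
--         ans.append(encoded[i]^ans[-1])
--
--     return ans
-- ===== SOURCE B (Python) =====
-- def solve(encoded):
--     # Single pass over `encoded` (running prefix-XOR + XOR of odd-indexed elements),
--     # then the closed-form XOR-of-1..m identity instead of A's first loop.
--     prefixes = [0]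
--     p = 0
--     odd_xor = 0
--     odd = False
--     for x in encoded:
--         p ^= x
--         prefixes.append(p)
--         if odd:
--             odd_xor ^= x
--         odd = not odd
--     m = len(encoded) + 1
--     first = [m, 1, m + 1, 0][m % 4] ^ odd_xor
--     return [first ^ q for q in prefixes]
-- ===== Notes on version B (the rewrite author's own statement) =====
-- stated objective: alternative
-- what changed: A's first loop (cumulative XOR of 1..n+1) is replaced by the closed-form xor-upto identity [m,1,m+1,0][m%4], and A's remaining two index-based loops are fused into one direct pass over the list that maintains the running prefix-XOR and the XOR of odd-indexed elements, followed by a final map.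
import Mathlib
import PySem

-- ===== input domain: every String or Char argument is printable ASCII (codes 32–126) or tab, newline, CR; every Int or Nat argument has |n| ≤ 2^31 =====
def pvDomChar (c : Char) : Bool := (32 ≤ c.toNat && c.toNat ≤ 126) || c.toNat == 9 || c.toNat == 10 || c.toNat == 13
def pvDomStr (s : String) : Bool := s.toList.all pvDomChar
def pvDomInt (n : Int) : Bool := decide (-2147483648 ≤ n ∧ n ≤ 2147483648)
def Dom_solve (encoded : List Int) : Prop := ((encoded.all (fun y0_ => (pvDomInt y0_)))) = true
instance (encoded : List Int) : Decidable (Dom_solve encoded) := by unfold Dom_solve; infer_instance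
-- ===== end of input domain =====

-- B replaces A's cumulative-XOR loop by the closed-form xor-upto identity and fuses the
-- remaining two index loops into one direct pass over the list (objective: alternative).


-- ===== PORT A =====
def solve (encoded : List Int) : List Int :=
  let n : Int := PySem.List.len encoded
  let v : Int := (PySem.List.pyRange 1 (n + 2) 1).foldl (fun v i => PySem.Int.bxor v i) 0
  let v : Int := (PySem.List.pyRange 1 n 2).foldl
      (fun v i => PySem.Int.bxor v (PySem.List.pyGetD encoded i 0)) v
  (PySem.List.pyRange 0 n 1).foldl
      (fun ans i => ans ++ [PySem.Int.bxor (PySem.List.pyGetD encoded i 0) (PySem.List.pyGetD ans (-1) 0)])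
      [v]

-- ===== PORT B =====
def solve_alt (encoded : List Int) : List Int :=
  let st := encoded.foldl
    (fun (st : List Int × Int × Int × Bool) x =>
      let p := PySem.Int.bxor st.2.1 x
      let prefixes := st.1 ++ [p]
      let odd_xor := if st.2.2.2 then PySem.Int.bxor st.2.2.1 x else st.2.2.1
      (prefixes, p, odd_xor, !st.2.2.2))
    ([0], 0, 0, false)
  let m : Int := PySem.List.len encoded + 1
  let first := PySem.Int.bxor (PySem.List.pyGetD [m, 1, m + 1, 0] (PySem.Int.mod m 4) 0) st.2.2.1
  st.1.map (fun q => PySem.Int.bxor first q)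

-- ===== PRECONDITION & SPEC =====
def Spec_solve (encoded : List Int) (out : List Int) : Prop := out = solve_alt encoded
instance (encoded : List Int) (out : List Int) : Decidable (Spec_solve encoded out) := by unfold Spec_solve; infer_instance

-- ===== CLAIM (what is proved, stated in full; the proofs are below) =====
def Claim_equal_solve : Prop := ∀ (encoded : List Int), Dom_solve encoded → Spec_solve encoded (solve encoded)

-- ===== LEMMAS AND PROOFS =====

def pvTable (N : Nat) : Nat := if N % 4 = 0 then N else if N % 4 = 1 then 1 else if N % 4 = 2 then N + 1 else 0

theorem pv_two_mul_xor_one (a : Nat) : (2 * a) ^^^ 1 = 2 * a + 1 := by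
  apply Nat.eq_of_testBit_eq
  intro i
  cases i with
  | zero => simp [Nat.testBit_zero]
  | succ i =>
    simp [Nat.testBit_add_one]

theorem pv_even_xor_succ (a : Nat) : (2 * a) ^^^ (2 * a + 1) = 1 := by
  conv_lhs => rw [← pv_two_mul_xor_one a]
  rw [← Nat.xor_assoc, Nat.xor_self, Nat.zero_xor]

theorem pv_xorUpto_closed (N : Nat) :
    (List.range N).foldl (fun a k => a ^^^ (k + 1)) 0 = pvTable N := by
  induction N with
  | zero => simp [pvTable]
  | succ N ih =>
    rw [List.range_succ, List.foldl_append, ih]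
    simp only [List.foldl_cons, List.foldl_nil]
    have h4 : N % 4 = 0 ∨ N % 4 = 1 ∨ N % 4 = 2 ∨ N % 4 = 3 := by omega
    rcases h4 with h | h | h | h
    · have ha : N = 2 * (N / 2) := by omega
      have : pvTable N = N := by simp [pvTable, h]
      rw [this]
      have hres : (N + 1) % 4 = 1 := by omega
      have : pvTable (N + 1) = 1 := by simp [pvTable, hres]
      rw [this, ha]
      exact pv_even_xor_succ _
    · have : pvTable N = 1 := by simp [pvTable, h]
      rw [this]
      have hres : (N + 1) % 4 = 2 := by omega
      have : pvTable (N + 1) = N + 2 := by simp [pvTable, hres]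
      rw [this]
      have ha : N + 1 = 2 * ((N + 1) / 2) := by omega
      rw [Nat.xor_comm, ha, pv_two_mul_xor_one]
      omega
    · have : pvTable N = N + 1 := by simp [pvTable, h]
      rw [this, Nat.xor_self]
      have hres : (N + 1) % 4 = 3 := by omega
      simp [pvTable, hres]
    · have : pvTable N = 0 := by simp [pvTable, h]
      rw [this, Nat.zero_xor]
      have hres : (N + 1) % 4 = 0 := by omega
      simp [pvTable, hres]

theorem pv_loop1_nat (N : Nat) :
    (List.range N).foldl (fun (v : Int) (k : Nat) => PySem.Int.bxor v (1 + (k : Int))) 0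
      = ((List.range N).foldl (fun a k => a ^^^ (k + 1)) 0 : Nat) := by
  induction N with
  | zero => simp
  | succ N ih =>
    rw [List.range_succ, List.foldl_append, List.foldl_append, ih]
    simp only [List.foldl_cons, List.foldl_nil]
    have : (1 : Int) + (N : Int) = ((N + 1 : Nat) : Int) := by push_cast; ring
    rw [this, PySem.Int.bxor_natCast]

def pvOXor : Bool → List Int → Int
  | _, [] => 0
  | odd, x :: t => if odd then PySem.Int.bxor x (pvOXor (!odd) t) else pvOXor (!odd) t

def pvScan : List Int → Int → List Int
  | [], _ => []
  | x :: t, p => PySem.Int.bxor p x :: pvScan t (PySem.Int.bxor p x)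

def pvAScan : List Int → Int → List Int
  | [], _ => []
  | x :: t, v => PySem.Int.bxor x v :: pvAScan t (PySem.Int.bxor x v)

theorem pv_bxor_eq_xor (a b : Int) : PySem.Int.bxor a b = Int.xor a b := by
  cases a with
  | ofNat m =>
    cases b with
    | ofNat n => simp [PySem.Int.bxor, Int.xor]
    | negSucc n => simp [PySem.Int.bxor, Int.xor, Int.negSucc_eq]; omega
  | negSucc m =>
    cases b with
    | ofNat n => simp [PySem.Int.bxor, Int.xor, Int.negSucc_eq]; omega
    | negSucc n => simp [PySem.Int.bxor, Int.xor, Int.negSucc_eq]; omega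

theorem pv_xor_assoc (a b c : Int) :
    Int.xor (Int.xor a b) c = Int.xor a (Int.xor b c) := by
  cases a <;> cases b <;> cases c <;> simp [Int.xor, Nat.xor_assoc]

theorem pv_bxor_assoc (a b c : Int) :
    PySem.Int.bxor (PySem.Int.bxor a b) c = PySem.Int.bxor a (PySem.Int.bxor b c) := by
  simp only [pv_bxor_eq_xor]; exact pv_xor_assoc a b c

theorem pv_zero_bxor (a : Int) : PySem.Int.bxor 0 a = a := by
  rw [PySem.Int.bxor_comm]; exact PySem.Int.bxor_zero a

theorem pv_foldB (xs : List Int) (pres : List Int) (p oddx : Int) (odd : Bool) :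
    xs.foldl
      (fun (st : List Int × Int × Int × Bool) x =>
        let q := PySem.Int.bxor st.2.1 x
        let prefixes := st.1 ++ [q]
        let odd_xor := if st.2.2.2 then PySem.Int.bxor st.2.2.1 x else st.2.2.1
        (prefixes, q, odd_xor, !st.2.2.2))
      (pres, p, oddx, odd)
    = (pres ++ pvScan xs p, xs.foldl PySem.Int.bxor p, PySem.Int.bxor oddx (pvOXor odd xs),
       xs.foldl (fun b _ => !b) odd) := by
  induction xs generalizing pres p oddx odd with
  | nil => simp [pvScan, pvOXor]
  | cons x t ih =>
    simp only [List.foldl_cons]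
    rw [ih]
    refine Prod.ext ?_ (Prod.ext ?_ (Prod.ext ?_ ?_)) <;> simp [pvScan, pvOXor]
    · cases odd <;> simp [pv_bxor_assoc]

theorem pv_loop2 : ∀ (xs : List Int) (v0 : Int),
    (List.range (xs.length / 2)).foldl (fun v k => PySem.Int.bxor v (xs.getD (2 * k + 1) 0)) v0
      = PySem.Int.bxor v0 (pvOXor false xs)
  | [], v0 => by simp [pvOXor, PySem.Int.bxor_zero]
  | [a], v0 => by simp [pvOXor, PySem.Int.bxor_zero]
  | a :: b :: t, v0 => by
    have hlen : (a :: b :: t).length / 2 = t.length / 2 + 1 := by simp; omega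
    rw [hlen, List.range_succ_eq_map]
    simp only [List.foldl_cons, List.foldl_map]
    have hg : ∀ (v : Int) (k : Nat), PySem.Int.bxor v ((a :: b :: t).getD (2 * (k + 1) + 1) 0)
        = PySem.Int.bxor v (t.getD (2 * k + 1) 0) := by
      intro v k
      have h2 : 2 * (k + 1) + 1 = (2 * k + 1) + 1 + 1 := by omega
      rw [h2]; rfl
    simp only [hg]
    have hb : (a :: b :: t).getD (2 * 0 + 1) 0 = b := rfl
    rw [hb, pv_loop2 t (PySem.Int.bxor v0 b)]
    show _ = PySem.Int.bxor v0 (PySem.Int.bxor b (pvOXor false t))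
    rw [pv_bxor_assoc]

theorem pv_getD_last (pre : List Int) (v : Int) :
    PySem.List.pyGetD (pre ++ [v]) (-1) 0 = v := by
  simp [PySem.List.pyGetD, PySem.List.pyGet?, PySem.List.pyIdx?]

theorem pv_loop3 (xs : List Int) (pre : List Int) (v : Int) :
    xs.foldl (fun ans x => ans ++ [PySem.Int.bxor x (PySem.List.pyGetD ans (-1) 0)]) (pre ++ [v])
      = pre ++ [v] ++ pvAScan xs v := by
  induction xs generalizing pre v with
  | nil => simp [pvAScan]
  | cons x t ih =>
    simp only [List.foldl_cons]
    rw [pv_getD_last, List.append_assoc pre [v] _, ← List.append_assoc]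
    rw [ih (pre ++ [v]) (PySem.Int.bxor x v)]
    simp [pvAScan]

theorem pv_map_scan (xs : List Int) (p v : Int) :
    (pvScan xs p).map (fun q => PySem.Int.bxor v q) = pvAScan xs (PySem.Int.bxor v p) := by
  induction xs generalizing p v with
  | nil => rfl
  | cons x t ih =>
    simp only [pvScan, pvAScan, List.map_cons]
    have harg : PySem.Int.bxor v (PySem.Int.bxor p x) = PySem.Int.bxor x (PySem.Int.bxor v p) := by
      rw [← pv_bxor_assoc, PySem.Int.bxor_comm]
    rw [ih, harg]

-- loop 1 of A equals the closed form
theorem pv_loop1 (encoded : List Int) :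
    (PySem.List.pyRange 1 ((PySem.List.len encoded) + 2) 1).foldl (fun v i => PySem.Int.bxor v i) 0
      = ((pvTable (encoded.length + 1) : Nat) : Int) := by
  rw [PySem.List.pyRange_one]
  simp only [PySem.List.len_eq]
  have hc : ((encoded.length : Int) + 2 - 1).toNat = encoded.length + 1 := by omega
  rw [hc, List.foldl_map]
  rw [pv_loop1_nat, pv_xorUpto_closed]

-- the table lookup of B equals the closed form
theorem pv_lookup (encoded : List Int) :
    PySem.List.pyGetD [(PySem.List.len encoded) + 1, 1, (PySem.List.len encoded) + 1 + 1, 0]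
        (PySem.Int.mod ((PySem.List.len encoded) + 1) 4) 0
      = ((pvTable (encoded.length + 1) : Nat) : Int) := by
  simp only [PySem.List.len_eq]
  have hm : ((encoded.length : Int) + 1) = ((encoded.length + 1 : Nat) : Int) := by push_cast; ring
  have h4 : (4 : Int) = ((4 : Nat) : Int) := rfl
  rw [hm, h4, PySem.Int.mod_natCast]
  rw [PySem.List.pyGetD_natCast]
  have h : (encoded.length + 1) % 4 = 0 ∨ (encoded.length + 1) % 4 = 1 ∨ (encoded.length + 1) % 4 = 2 ∨ (encoded.length + 1) % 4 = 3 := by omega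
  rcases h with h | h | h | h <;> rw [h] <;> simp [pvTable, h]

-- loop 2 of A via pv_loop2
theorem pv_loop2' (encoded : List Int) (v0 : Int) :
    (PySem.List.pyRange 1 (PySem.List.len encoded) 2).foldl
        (fun v i => PySem.Int.bxor v (PySem.List.pyGetD encoded i 0)) v0
      = PySem.Int.bxor v0 (pvOXor false encoded) := by
  rw [PySem.List.pyRange_of_pos 1 _ (by omega : (0:Int) < 2)]
  simp only [PySem.List.len_eq]
  have hcount : (if (1:Int) < (encoded.length : Int) then (((encoded.length : Int) - 1 + 2 - 1) / 2).toNat else 0) = encoded.length / 2 := by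
    split_ifs with h
    · omega
    · omega
  rw [hcount, List.foldl_map]
  have hfun : ∀ (v : Int) (k : Nat), PySem.Int.bxor v (PySem.List.pyGetD encoded (1 + 2 * (k : Int)) 0)
      = PySem.Int.bxor v (encoded.getD (2 * k + 1) 0) := by
    intro v k
    have : (1 : Int) + 2 * (k : Int) = ((2 * k + 1 : Nat) : Int) := by push_cast; ring
    rw [this, PySem.List.pyGetD_natCast]
  simp only [hfun]
  exact pv_loop2 encoded v0

theorem solve_eq (encoded : List Int) : solve encoded = solve_alt encoded := by
  unfold solve solve_alt
  simp only []
  rw [pv_loop1, pv_loop2']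
  rw [PySem.List.foldl_pyRange_zero_pyGetD encoded 0
    (fun ans x => ans ++ [PySem.Int.bxor x (PySem.List.pyGetD ans (-1) 0)]) _]
  rw [show ([PySem.Int.bxor (((pvTable (encoded.length + 1) : Nat)) : Int) (pvOXor false encoded)] : List Int)
      = [] ++ [PySem.Int.bxor (((pvTable (encoded.length + 1) : Nat)) : Int) (pvOXor false encoded)] from rfl]
  rw [pv_loop3, pv_foldB, pv_lookup]
  simp only [List.nil_append, List.map_cons, List.map_append]
  rw [pv_zero_bxor, pv_map_scan]
  rw [PySem.Int.bxor_zero]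
  simp

-- ===== VERDICT (by name: the statement is the Claim_ definition above) =====
theorem solve_spec : Claim_equal_solve := by
  intro encoded _
  exact solve_eq encoded
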